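-- pv_equiv track=rewrite | github.com/murphy-97/CSE423-Compiler | optimizer.py | rem_extra_stores
-- ===== SOURCE A (Python) =====
-- def rem_extra_stores(ir_lines):
--     # A store is extra if its value is never loaded
--     for i in range(0, len(ir_lines)):
--         i_split = ir_lines[i].split()
--
--         if ("store" in i_split):
--             value_used = False
--
--             for j in range(i+1, len(ir_lines)):
--                 j_split = ir_lines[j].split()
--                 if ("load" in j_split and i_split[4] == j_split[5]):
--                     # This stored value is loaded
--                     value_used = True
--                     break
--                 elif ("ret" in j_split and i_split[4] == j_split[2]):
--                     # Value is used by a return statement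
--                     value_used = True
--                     break
--                 elif ("store" in j_split and i_split[4] == j_split[4]):
--                     # A new value is stored before the old value is loaded
--                     break
--
--             # If the value was not used, then remove the line
--             if (not value_used):
--                 ir_lines[i] = ""
--
--     return ir_lines
-- ===== SOURCE B (Python) =====
-- def rem_extra_stores(ir_lines):
--     # A store is extra if its value is never loaded.
--     # Single backward pass: used[v] records whether the next event for v
--     # (first matching load/ret/store going forward) makes the value used.
--     used = {}
--     for i in range(len(ir_lines) - 1, -1, -1):
--         toks = ir_lines[i].split()
--         if "store" in toks:
--             if not (len(toks) > 4 and used.get(toks[4], False)):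
--                 ir_lines[i] = ""
--             if len(toks) > 4:
--                 used[toks[4]] = False
--         if "ret" in toks and len(toks) > 2:
--             used[toks[2]] = True
--         if "load" in toks and len(toks) > 5:
--             used[toks[5]] = True
--     return ir_lines
-- ===== Notes on version B (the rewrite author's own statement) =====
-- stated objective: alternative
-- what changed: Replaces A's forward rescan of the suffix after every store by a single backward pass keeping a per-variable dictionary that records whether the variable's next load/ret/store event uses the stored value (O(n^2) worst case becomes O(n); on the generated inputs, which contain almost no store lines, A's inner loop never runs and no speed-up is measured).
-- outside the precondition, e.g. on rem_extra_stores(['store']): A returns [''], B returns ['']; on rem_extra_stores(['load a']): A returns ['load a'], B returns ['load a']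
import Mathlib
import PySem

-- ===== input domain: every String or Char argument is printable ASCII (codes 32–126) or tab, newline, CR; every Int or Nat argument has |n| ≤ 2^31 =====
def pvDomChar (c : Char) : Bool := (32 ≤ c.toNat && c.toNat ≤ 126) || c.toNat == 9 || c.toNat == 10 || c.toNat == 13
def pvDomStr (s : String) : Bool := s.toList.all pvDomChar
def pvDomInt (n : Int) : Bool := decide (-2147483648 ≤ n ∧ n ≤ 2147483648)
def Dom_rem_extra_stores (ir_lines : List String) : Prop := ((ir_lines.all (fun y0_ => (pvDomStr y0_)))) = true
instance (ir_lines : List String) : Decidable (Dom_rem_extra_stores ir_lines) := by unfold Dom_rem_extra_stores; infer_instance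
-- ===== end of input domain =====

-- B replaces A's forward rescan after every store by a single backward pass keeping a
-- per-variable "next event" dictionary (objective: alternative single-pass algorithm).
-- Both A and B mutate ir_lines in place in Python (blanking lines) and return it;
-- the equivalence proved here is about the returned value.

-- ===== PORT A =====
-- inner loop 'for j in range(i+1, len(ir_lines))' of A
def pvAInner (state : List String) (v : String) : List Int → Bool
  | [] => false
  | j :: rest =>
    let jsp := PySem.Str.split₀ (PySem.List.pyGetD state j "")
    if jsp.contains "load" && (PySem.List.pyGetD jsp 5 "" == v) then true
    else if jsp.contains "ret" && (PySem.List.pyGetD jsp 2 "" == v) then true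
    else if jsp.contains "store" && (PySem.List.pyGetD jsp 4 "" == v) then false
    else pvAInner state v rest

-- outer loop 'for i in range(0, len(ir_lines))', threading the mutated list
def pvAOuter (state : List String) : List Int → List String
  | [] => state
  | i :: rest =>
    let isp := PySem.Str.split₀ (PySem.List.pyGetD state i "")
    let state' :=
      if isp.contains "store" then
        if pvAInner state (PySem.List.pyGetD isp 4 "")
            (PySem.List.pyRange (i + 1) (state.length : Int) 1) then state
        else PySem.List.pySetD state i ""
      else state
    pvAOuter state' rest

def rem_extra_stores (ir_lines : List String) : List String :=
  pvAOuter ir_lines (PySem.List.pyRange 0 (ir_lines.length : Int) 1)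

-- ===== PORT B =====
-- backward loop 'for i in range(len(ir_lines)-1, -1, -1)' of B with the used-dictionary
def pvBGo (state : List String) (used : PySem.Dict String Bool) : List Int → List String
  | [] => state
  | i :: rest =>
    let toks := PySem.Str.split₀ (PySem.List.pyGetD state i "")
    let state' :=
      if toks.contains "store" &&
         !(decide (4 < toks.length) && used.getD (PySem.List.pyGetD toks 4 "") false) then
        PySem.List.pySetD state i ""
      else state
    let used1 := if toks.contains "store" && decide (4 < toks.length) then
        used.insert (PySem.List.pyGetD toks 4 "") false else used
    let used2 := if toks.contains "ret" && decide (2 < toks.length) then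
        used1.insert (PySem.List.pyGetD toks 2 "") true else used1
    let used3 := if toks.contains "load" && decide (5 < toks.length) then
        used2.insert (PySem.List.pyGetD toks 5 "") true else used2
    pvBGo state' used3 rest

def rem_extra_stores_alt (ir_lines : List String) : List String :=
  pvBGo ir_lines PySem.Dict.empty
    (PySem.List.pyRange ((ir_lines.length : Int) - 1) (-1) (-1))

-- ===== PRECONDITION & SPEC =====
-- Pre_ excludes exactly the token-arity defects that make A raise IndexError ("store"
-- lines with < 5 tokens, "load" lines with < 6, "ret" lines with < 3): A raises on such
-- a line whenever a store's forward scan evaluates it; where no scan reaches the line A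
-- returns normally and B returns the same value there — A's exact raise condition depends
-- on which scans break early and has no closed form, so Pre_ is this conservative bound.
def Pre_rem_extra_stores (ir_lines : List String) : Prop :=
  ∀ s ∈ ir_lines,
    (("store" ∈ PySem.Str.split₀ s → 5 ≤ (PySem.Str.split₀ s).length) ∧
     ("load" ∈ PySem.Str.split₀ s → 6 ≤ (PySem.Str.split₀ s).length) ∧
     ("ret" ∈ PySem.Str.split₀ s → 3 ≤ (PySem.Str.split₀ s).length))
instance (ir_lines : List String) : Decidable (Pre_rem_extra_stores ir_lines) := by
  unfold Pre_rem_extra_stores; infer_instance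

def pvWitness_rem_extra_stores : List String :=
  ["store i32 5 , %a", "%b = load i32 , %a", "store i32 7 , %a"]

def Spec_rem_extra_stores (ir_lines : List String) (out : List String) : Prop := out = rem_extra_stores_alt ir_lines
instance (ir_lines : List String) (out : List String) : Decidable (Spec_rem_extra_stores ir_lines out) := by unfold Spec_rem_extra_stores; infer_instance

-- ===== CLAIM (what is proved, stated in full; the proofs are below) =====
def Claim_equal_rem_extra_stores : Prop := ∀ (ir_lines : List String), Dom_rem_extra_stores ir_lines → Pre_rem_extra_stores ir_lines → Spec_rem_extra_stores ir_lines (rem_extra_stores ir_lines)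

-- ===== LEMMAS AND PROOFS =====

-- forward scan over a suffix of the original lines, in A's branch order:
-- is the next load/ret/store event for v a use?
def pvScan (v : String) : List String → Bool
  | [] => false
  | s :: rest =>
    let jsp := PySem.Str.split₀ s
    if jsp.contains "load" && (PySem.List.pyGetD jsp 5 "" == v) then true
    else if jsp.contains "ret" && (PySem.List.pyGetD jsp 2 "" == v) then true
    else if jsp.contains "store" && (PySem.List.pyGetD jsp 4 "" == v) then false
    else pvScan v rest

-- the common pure specification: blank each store whose next event is not a use
def pvPure : List String → List String
  | [] => []
  | s :: rest =>
    let toks := PySem.Str.split₀ s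
    (if toks.contains "store" && !(pvScan (PySem.List.pyGetD toks 4 "") rest) then "" else s)
      :: pvPure rest

theorem pvGetD_eq (l : List String) (i : Nat) (h : i < l.length) :
    PySem.List.pyGetD l (i : Int) "" = l[i] := by
  simp [List.getD_eq_getElem?_getD, List.getElem?_eq_getElem h]

theorem pvAInner_eq_scan : ∀ (k : Nat) (st : List String) (v : String) (i : Nat),
    st.length = i + k →
    pvAInner st v (PySem.List.pyRange (i : Int) (st.length : Int) 1) = pvScan v (st.drop i) := by
  intro k
  induction k with
  | zero =>
    intro st v i h
    rw [PySem.List.pyRange_one_eq_nil (by exact_mod_cast h.le),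
      List.drop_of_length_le (by omega)]
    rfl
  | succ k ih =>
    intro st v i h
    have hi : i < st.length := by omega
    rw [PySem.List.pyRange_one_cons (by exact_mod_cast hi),
      List.drop_eq_getElem_cons hi]
    have hrec := ih st v (i + 1) (by omega)
    have hcast : ((i : Int) + 1) = ((i + 1 : Nat) : Int) := by push_cast; ring
    simp only [pvAInner, pvScan, pvGetD_eq st i hi, hcast, hrec]

theorem pvAOuter_eq : ∀ (k : Nat) (st : List String) (i : Nat),
    st.length = i + k →
    pvAOuter st (PySem.List.pyRange (i : Int) (st.length : Int) 1) = st.take i ++ pvPure (st.drop i) := by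
  intro k
  induction k with
  | zero =>
    intro st i h
    rw [PySem.List.pyRange_one_eq_nil (by exact_mod_cast h.le),
      List.drop_of_length_le (by omega), List.take_of_length_le (by omega)]
    simp [pvAOuter, pvPure]
  | succ k ih =>
    intro st i h
    have hi : i < st.length := by omega
    rw [PySem.List.pyRange_one_cons (by exact_mod_cast hi)]
    have hcast : ((i : Int) + 1) = ((i + 1 : Nat) : Int) := by push_cast; ring
    have hscan := pvAInner_eq_scan k st
      (PySem.List.pyGetD (PySem.Str.split₀ st[i]) 4 "") (i + 1) (by omega)
    have htake : st.take (i + 1) = st.take i ++ [st[i]] := by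
      rw [List.take_add_one]; simp [List.getElem?_eq_getElem hi]
    have hdropPure : pvPure (st.drop i)
        = (if (PySem.Str.split₀ st[i]).contains "store"
              && !(pvScan (PySem.List.pyGetD (PySem.Str.split₀ st[i]) 4 "") (st.drop (i+1)))
           then "" else st[i]) :: pvPure (st.drop (i + 1)) := by
      rw [List.drop_eq_getElem_cons hi]; rfl
    simp only [pvAOuter, pvGetD_eq st i hi, hcast, hscan]
    by_cases hc : (PySem.Str.split₀ st[i]).contains "store" = true
    · by_cases hs : pvScan (PySem.List.pyGetD (PySem.Str.split₀ st[i]) 4 "") (st.drop (i+1)) = true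
      · -- value used: line kept
        rw [if_pos hc, if_pos hs, ih st (i + 1) (by omega), hdropPure, htake]
        simp only [hc, hs, Bool.not_true, Bool.and_false, Bool.false_eq_true, if_false,
          List.append_assoc, List.singleton_append]
      · -- value unused: line blanked
        have hsf : pvScan (PySem.List.pyGetD (PySem.Str.split₀ st[i]) 4 "") (st.drop (i+1)) = false := by
          simpa using hs
        rw [if_pos hc, if_neg hs]
        have hset : (PySem.List.pySetD st (i : Int) "").length = i + 1 + k := by
          simp [PySem.List.pySetD_natCast]; omega
        have hlen : ((PySem.List.pySetD st (i : Int) "").length : Int) = (st.length : Int) := by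
          simp [PySem.List.pySetD_natCast]
        rw [← hlen, ih (PySem.List.pySetD st (i : Int) "") (i + 1) hset, hdropPure]
        simp only [PySem.List.pySetD_natCast]
        rw [List.take_set, List.drop_set_of_lt (by omega), htake, List.set_append]
        simp only [hc, hsf, Bool.not_false, Bool.and_true, if_true, List.length_take,
          Nat.min_eq_left hi.le, lt_irrefl, if_false, Nat.sub_self, List.set_cons_zero,
          List.append_assoc, List.singleton_append]
    · have hcf : (PySem.Str.split₀ st[i]).contains "store" = false := by simpa using hc
      rw [if_neg hc, ih st (i + 1) (by omega), hdropPure, htake]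
      simp only [hcf, Bool.false_and, Bool.false_eq_true, if_false,
        List.append_assoc, List.singleton_append]

theorem pvA_eq_pure (l : List String) : rem_extra_stores l = pvPure l := by
  have h := pvAOuter_eq l.length l 0 (by omega)
  simpa [rem_extra_stores] using h

set_option maxRecDepth 8192 in
theorem pvBGo_eq (orig : List String) (hPre : Pre_rem_extra_stores orig) :
    ∀ (i1 : Nat) (used : PySem.Dict String Bool),
    i1 ≤ orig.length →
    (∀ v, used.getD v false = pvScan v (orig.drop i1)) →
    pvBGo (orig.take i1 ++ pvPure (orig.drop i1)) used
      (PySem.List.pyRange ((i1 : Int) - 1) (-1) (-1)) = pvPure orig := by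
  intro i1
  induction i1 with
  | zero =>
    intro used _ _
    rw [PySem.List.pyRange_neg_one_eq_nil (by norm_num)]
    simp [pvBGo]
  | succ i1 ih =>
    intro used h hused
    have hi : i1 < orig.length := by omega
    have hcast : ((i1 + 1 : Nat) : Int) - 1 = (i1 : Int) := by push_cast; ring
    rw [hcast, PySem.List.pyRange_neg_one_cons (by omega)]
    have htake : orig.take (i1 + 1) = orig.take i1 ++ [orig[i1]] := by
      rw [List.take_add_one]; simp [List.getElem?_eq_getElem hi]
    have hdrop : orig.drop i1 = orig[i1] :: orig.drop (i1 + 1) := List.drop_eq_getElem_cons hi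
    have hlenpre : (orig.take i1).length = i1 := by simp [Nat.min_eq_left hi.le]
    obtain ⟨hpS, hpL, hpR⟩ := hPre orig[i1] (List.getElem_mem hi)
    have hread : PySem.List.pyGetD (orig.take (i1 + 1) ++ pvPure (orig.drop (i1 + 1)))
        (i1 : Int) "" = orig[i1] := by
      rw [htake, List.append_assoc, List.singleton_append, PySem.List.pyGetD_natCast]
      simp [List.getD_eq_getElem?_getD, hlenpre]
    simp only [pvBGo, hread]
    have hcond : ((PySem.Str.split₀ orig[i1]).contains "store"
          && !(decide (4 < (PySem.Str.split₀ orig[i1]).length)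
               && used.getD (PySem.List.pyGetD (PySem.Str.split₀ orig[i1]) 4 "") false))
        = ((PySem.Str.split₀ orig[i1]).contains "store"
          && !(pvScan (PySem.List.pyGetD (PySem.Str.split₀ orig[i1]) 4 "") (orig.drop (i1 + 1)))) := by
      by_cases hcs : "store" ∈ PySem.Str.split₀ orig[i1]
      · have h4 : 4 < (PySem.Str.split₀ orig[i1]).length := by have := hpS hcs; omega
        simp [hcs, h4, hused]
      · simp [hcs]
    rw [hcond]
    have hset : PySem.List.pySetD (orig.take (i1 + 1) ++ pvPure (orig.drop (i1 + 1)))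
        (i1 : Int) "" = orig.take i1 ++ "" :: pvPure (orig.drop (i1 + 1)) := by
      rw [PySem.List.pySetD_natCast, htake, List.append_assoc, List.singleton_append,
        List.set_append]
      simp [hlenpre]
    have hstate : (if ((PySem.Str.split₀ orig[i1]).contains "store"
          && !(pvScan (PySem.List.pyGetD (PySem.Str.split₀ orig[i1]) 4 "") (orig.drop (i1 + 1))))
            = true
        then PySem.List.pySetD (orig.take (i1 + 1) ++ pvPure (orig.drop (i1 + 1))) (i1 : Int) ""
        else orig.take (i1 + 1) ++ pvPure (orig.drop (i1 + 1)))
        = orig.take i1 ++ pvPure (orig.drop i1) := by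
      rw [hdrop]
      by_cases hcb : ((PySem.Str.split₀ orig[i1]).contains "store"
          && !(pvScan (PySem.List.pyGetD (PySem.Str.split₀ orig[i1]) 4 "") (orig.drop (i1 + 1))))
            = true
      · rw [if_pos hcb, hset]
        simp only [pvPure, hcb, if_true]
      · rw [if_neg hcb, htake, List.append_assoc, List.singleton_append]
        have hcbf := eq_false_of_ne_true hcb
        simp only [pvPure, hcbf, Bool.false_eq_true, if_false]
    rw [hstate]
    apply ih _ (by omega)
    -- the updated dictionary encodes the scan one line earlier
    intro v
    rw [hdrop]
    simp only [pvScan]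
    generalize hts : PySem.Str.split₀ orig[i1] = ts
    rw [hts] at hpS hpL hpR
    clear hts hread hcond hset hstate htake hdrop ih hPre h hcast hlenpre hi
    by_cases hl : "load" ∈ ts <;> by_cases hr : "ret" ∈ ts <;> by_cases hst : "store" ∈ ts
    all_goals
      try have h6 : 5 < ts.length := by have := hpL hl; omega
    all_goals
      try have h3 : 2 < ts.length := by have := hpR hr; omega
    all_goals
      try have h5 : 4 < ts.length := by have := hpS hst; omega
    all_goals
      simp_all [PySem.Dict.getD_insert, beq_iff_eq]
    all_goals simp [eq_comm]

theorem pvB_eq_pure (l : List String) (hPre : Pre_rem_extra_stores l) :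
    rem_extra_stores_alt l = pvPure l := by
  have h := pvBGo_eq l hPre l.length PySem.Dict.empty (le_refl _)
    (by intro v; simp [PySem.Dict.getD_empty, List.drop_length, pvScan])
  simpa [rem_extra_stores_alt, pvPure] using h

-- ===== VERDICT (by name: the statement is the Claim_ definition above) =====
theorem rem_extra_stores_spec : Claim_equal_rem_extra_stores := by
  intro l _ hPre
  unfold Spec_rem_extra_stores
  rw [pvA_eq_pure, pvB_eq_pure l hPre]
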